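-- pv_equiv track=rewrite | github.com/Mr-Coder/Qualia-basedS2Approach | src/evaluators/relation_discovery_evaluator.py | _are_related_types
-- ===== SOURCE A (Python) =====
-- def _are_related_types(type1: str, type2: str) -> bool:
--     """检查两个关系类型是否相关"""
--     related_groups = [
--         {"mathematical_operations", "proportional_relations"},
--         {"unit_conversions", "physical_constraints"},
--         {"temporal_relations", "geometric_properties"}
--     ]
--
--     for group in related_groups:
--         if type1 in group and type2 in group:
--             return True
--
--     return False
-- ===== SOURCE B (Python) =====
-- _TYPE_TO_GROUP = {
--     "mathematical_operations": 0,
--     "proportional_relations": 0,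
--     "unit_conversions": 1,
--     "physical_constraints": 1,
--     "temporal_relations": 2,
--     "geometric_properties": 2,
-- }
--
-- def _are_related_types(type1: str, type2: str) -> bool:
--     g = _TYPE_TO_GROUP.get(type1)
--     return g is not None and g == _TYPE_TO_GROUP.get(type2)
-- ===== Notes on version B (the rewrite author's own statement) =====
-- stated objective: idiomatic
-- what changed: Replaced the loop over a list of sets with double membership tests by a flat type-to-group-index dict built once, so the function is a single lookup of each argument and one equality comparison.
import Mathlib
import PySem

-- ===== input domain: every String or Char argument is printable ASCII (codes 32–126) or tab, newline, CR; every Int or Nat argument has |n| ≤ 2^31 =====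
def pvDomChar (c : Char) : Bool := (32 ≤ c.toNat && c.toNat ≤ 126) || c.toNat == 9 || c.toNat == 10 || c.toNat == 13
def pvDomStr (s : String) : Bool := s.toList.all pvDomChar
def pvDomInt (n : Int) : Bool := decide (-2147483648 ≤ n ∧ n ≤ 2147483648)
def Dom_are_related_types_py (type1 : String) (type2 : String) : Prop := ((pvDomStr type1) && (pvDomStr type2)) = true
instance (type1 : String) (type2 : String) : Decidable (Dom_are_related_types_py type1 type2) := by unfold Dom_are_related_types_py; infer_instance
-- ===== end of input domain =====

-- B replaces A's per-call loop over three sets (two membership scans per set) by a flat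
-- type->group-index dict built once and a single equality of two lookups; return value only.

-- ===== PORT A =====
-- the loop 'for group in related_groups: if type1 in group and type2 in group: return True' / 'return False'
def relatedLoop (type1 : String) (type2 : String) : List (PySem.Set String) → Bool
  | [] => false
  | g :: rest =>
    if PySem.Set.contains g type1 && PySem.Set.contains g type2 then true
    else relatedLoop type1 type2 rest

def are_related_types_py (type1 : String) (type2 : String) : Bool :=
  let related_groups : List (PySem.Set String) :=
    [ PySem.Set.ofList ["mathematical_operations", "proportional_relations"],
      PySem.Set.ofList ["unit_conversions", "physical_constraints"],
      PySem.Set.ofList ["temporal_relations", "geometric_properties"] ]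
  relatedLoop type1 type2 related_groups

-- ===== PORT B =====
-- the module-level dict _TYPE_TO_GROUP of Source B
def typeToGroup : PySem.Dict String Int :=
  PySem.Dict.ofList
    [ ("mathematical_operations", 0), ("proportional_relations", 0),
      ("unit_conversions", 1), ("physical_constraints", 1),
      ("temporal_relations", 2), ("geometric_properties", 2) ]

-- 'g = _TYPE_TO_GROUP.get(type1); return g is not None and g == _TYPE_TO_GROUP.get(type2)'
def are_related_types_py_alt (type1 : String) (type2 : String) : Bool :=
  match PySem.Dict.get? typeToGroup type1 with
  | none => false
  | some g => PySem.Dict.get? typeToGroup type2 == some g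

-- ===== PRECONDITION & SPEC =====
def Spec_are_related_types_py (type1 : String) (type2 : String) (out : Bool) : Prop := out = are_related_types_py_alt type1 type2
instance (type1 : String) (type2 : String) (out : Bool) : Decidable (Spec_are_related_types_py type1 type2 out) := by unfold Spec_are_related_types_py; infer_instance

-- ===== CLAIM (what is proved, stated in full; the proofs are below) =====
def Claim_equal_are_related_types_py : Prop := ∀ (type1 : String) (type2 : String), Dom_are_related_types_py type1 type2 → Spec_are_related_types_py type1 type2 (are_related_types_py type1 type2)

-- ===== LEMMAS AND PROOFS =====

-- membership in a two-element Python set literal, as a disjunction of equality tests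
lemma mem2 (a b t : String) : (PySem.Set.ofList [a, b]).contains t = (t == a || t == b) := by
  by_cases h3 : b = a <;> by_cases h1 : t = a <;> by_cases h2 : t = b <;>
    simp_all [PySem.Set.ofList, PySem.Set.add, PySem.Set.contains, PySem.Set.empty, List.foldl]

-- the dict lookup, as an if-chain over the six keys
lemma get_t (t : String) : PySem.Dict.get? typeToGroup t =
    (if "mathematical_operations" == t then some (0:Int)
     else if "proportional_relations" == t then some 0
     else if "unit_conversions" == t then some 1
     else if "physical_constraints" == t then some 1
     else if "temporal_relations" == t then some 2
     else if "geometric_properties" == t then some 2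
     else none) := by
  have h : typeToGroup = PySem.Dict.mk
    [ ("mathematical_operations", 0), ("proportional_relations", 0),
      ("unit_conversions", 1), ("physical_constraints", 1),
      ("temporal_relations", 2), ("geometric_properties", 2) ] := by decide
  rw [h]
  by_cases h1 : "mathematical_operations" = t
  · subst h1; rfl
  by_cases h2 : "proportional_relations" = t
  · subst h2; rfl
  by_cases h3 : "unit_conversions" = t
  · subst h3; rfl
  by_cases h4 : "physical_constraints" = t
  · subst h4; rfl
  by_cases h5 : "temporal_relations" = t
  · subst h5; rfl
  by_cases h6 : "geometric_properties" = t
  · subst h6; rfl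
  simp [PySem.Dict.get?, List.find?, beq_eq_false_iff_ne.mpr h1, beq_eq_false_iff_ne.mpr h2,
    beq_eq_false_iff_ne.mpr h3, beq_eq_false_iff_ne.mpr h4, beq_eq_false_iff_ne.mpr h5,
    beq_eq_false_iff_ne.mpr h6]

-- ===== VERDICT (by name: the statement is the Claim_ definition above) =====
theorem are_related_types_py_spec : Claim_equal_are_related_types_py := by
  intro t1 t2 _
  unfold Spec_are_related_types_py
  simp only [are_related_types_py, are_related_types_py_alt, relatedLoop, mem2, get_t t1, get_t t2]
  by_cases h1 : "mathematical_operations" = t1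
  · subst h1; simp
    split_ifs <;> simp_all <;> simp_all [Eq.comm]
  by_cases h2 : "proportional_relations" = t1
  · subst h2; simp
    split_ifs <;> simp_all <;> simp_all [Eq.comm]
  by_cases h3 : "unit_conversions" = t1
  · subst h3; simp
    split_ifs <;> simp_all <;> simp_all [Eq.comm]
  by_cases h4 : "physical_constraints" = t1
  · subst h4; simp
    split_ifs <;> simp_all <;> simp_all [Eq.comm]
  by_cases h5 : "temporal_relations" = t1
  · subst h5; simp
    split_ifs <;> simp_all <;> simp_all [Eq.comm]
  by_cases h6 : "geometric_properties" = t1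
  · subst h6; simp
    split_ifs <;> simp_all <;> simp_all [Eq.comm]
  simp [beq_eq_false_iff_ne.mpr h1, beq_eq_false_iff_ne.mpr h2, beq_eq_false_iff_ne.mpr h3,
    beq_eq_false_iff_ne.mpr h4, beq_eq_false_iff_ne.mpr h5, beq_eq_false_iff_ne.mpr h6,
    beq_eq_false_iff_ne.mpr (fun h => h1 h.symm), beq_eq_false_iff_ne.mpr (fun h => h2 h.symm),
    beq_eq_false_iff_ne.mpr (fun h => h3 h.symm), beq_eq_false_iff_ne.mpr (fun h => h4 h.symm),
    beq_eq_false_iff_ne.mpr (fun h => h5 h.symm), beq_eq_false_iff_ne.mpr (fun h => h6 h.symm)]
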